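-- pv_equiv track=rewrite | github.com/MrBrantCode/unitest_baseline | mut_generate/mist_train_cf/cf_34080/solution.py | execute_startup_scripts
-- ===== SOURCE A (Python) =====
-- from typing import List
--
-- def execute_startup_scripts(script_names: List[str]) -> List[str]:
--     executed_scripts = set()
--     result = []
--     for script in script_names:
--         if script.startswith("start_") or script.endswith(".sh") or "unum" in script:
--             if script not in executed_scripts:
--                 result.append(script)
--                 executed_scripts.add(script)
--     return result
-- ===== SOURCE B (Python) =====
-- def execute_startup_scripts(script_names):
--     first = {}
--     for i, s in reversed(list(enumerate(script_names))):
--         if s.startswith("start_") or s.endswith(".sh") or "unum" in s: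
--             first[s] = i
--     return sorted(first, key=first.get)
-- ===== Notes on version B (the rewrite author's own statement) =====
-- stated objective: alternative
-- what changed: Replaces A's forward pass with a mutable seen-set and in-loop dedup branch by a backward scan that unconditionally overwrites a script-to-first-index map (the last, i.e. earliest, write wins, so no membership test is needed) and then returns the keys sorted by their first-occurrence index.
import Mathlib
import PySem

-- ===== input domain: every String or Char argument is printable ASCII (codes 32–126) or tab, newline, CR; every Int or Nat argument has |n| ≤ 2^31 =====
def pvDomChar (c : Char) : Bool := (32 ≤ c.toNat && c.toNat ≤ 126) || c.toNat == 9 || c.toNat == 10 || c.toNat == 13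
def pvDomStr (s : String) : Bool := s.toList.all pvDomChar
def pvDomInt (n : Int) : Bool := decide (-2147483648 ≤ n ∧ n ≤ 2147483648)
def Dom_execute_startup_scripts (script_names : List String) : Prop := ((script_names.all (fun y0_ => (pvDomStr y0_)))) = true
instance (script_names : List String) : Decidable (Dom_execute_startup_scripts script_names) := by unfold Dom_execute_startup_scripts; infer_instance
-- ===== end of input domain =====

-- B: backward scan that overwrites a script-to-first-index map unconditionally, then keys sorted by first index, instead of A's forward pass with a seen-set (alternative algorithm; return value only).


-- ===== PORT A =====
-- A's if-condition, in the Python's short-circuit order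
def pvPredA (script : String) : Bool :=
  PySem.Str.startswith script "start_" || PySem.Str.endswith script ".sh" || PySem.Str.isIn "unum" script

def execute_startup_scripts (script_names : List String) : List String :=
  (script_names.foldl
    (fun (st : PySem.Set String × List String) script =>
      if pvPredA script then
        if ¬ PySem.Set.contains st.1 script then
          (PySem.Set.add st.1 script, st.2 ++ [script])
        else st
      else st)
    (PySem.Set.empty, [])).2

-- ===== PORT B =====
-- B's if-condition (same tests, B's own helper)
def pvPredB (s : String) : Bool :=
  PySem.Str.startswith s "start_" || PySem.Str.endswith s ".sh" || PySem.Str.isIn "unum" s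

-- for i, s in reversed(list(enumerate(script_names))): if pred(s): first[s] = i
-- return sorted(first, key=first.get)   (all keys are present, so first.get k is the stored Int = getD k 0)
def execute_startup_scripts_alt (script_names : List String) : List String :=
  let first := (PySem.List.enumerate script_names 0).reverse.foldl
    (fun (d : PySem.Dict String Int) p => if pvPredB p.2 then d.insert p.2 p.1 else d)
    PySem.Dict.empty
  PySem.List.sorted first.keys (fun k => first.getD k 0) false

-- ===== PRECONDITION & SPEC =====
def Spec_execute_startup_scripts (script_names : List String) (out : List String) : Prop := out = execute_startup_scripts_alt script_names
instance (script_names : List String) (out : List String) : Decidable (Spec_execute_startup_scripts script_names out) := by unfold Spec_execute_startup_scripts; infer_instance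

-- ===== CLAIM (what is proved, stated in full; the proofs are below) =====
def Claim_equal_execute_startup_scripts : Prop := ∀ (script_names : List String), Dom_execute_startup_scripts script_names → Spec_execute_startup_scripts script_names (execute_startup_scripts script_names)

-- ===== LEMMAS AND PROOFS =====

-- invariant for A's loop: starting from a state whose seen-set list equals the result list,
-- it returns (Set.update r (filter pvPredA xs)) in both components
lemma pvLoop_inv (xs : List String) (r : List String) :
    xs.foldl
      (fun (st : PySem.Set String × List String) script =>
        if pvPredA script then
          if ¬ PySem.Set.contains st.1 script then
            (PySem.Set.add st.1 script, st.2 ++ [script])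
          else st
        else st)
      (r, r)
    = (PySem.Set.update r (xs.filter pvPredA), PySem.Set.update r (xs.filter pvPredA)) := by
  induction xs generalizing r with
  | nil => simp [PySem.Set.update]
  | cons x xs ih =>
    simp only [List.foldl_cons, List.filter_cons]
    by_cases hp : pvPredA x = true
    · by_cases hc : PySem.Set.contains r x = true
      · rw [PySem.Set.contains_iff] at hc
        have hadd : PySem.Set.add r x = r := by simp [PySem.Set.add, hc]
        rw [if_pos hp, if_pos hp, if_neg (by simp [hc]), ih r]
        simp [PySem.Set.update, hadd]
      · have hadd : PySem.Set.add r x = r ++ [x] := by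
          rw [PySem.Set.contains_iff] at hc
          simp [PySem.Set.add, hc]
        rw [if_pos hp, if_pos hp, if_pos hc, hadd, ih (r ++ [x])]
        simp [PySem.Set.update, hadd]
    · rw [if_neg hp, if_neg hp, ih r]

-- A's result equals ordered dedup of the filtered list
lemma pvA_eq_dedup_filter (xs : List String) :
    execute_startup_scripts xs = PySem.List.dedup (xs.filter pvPredA) := by
  unfold execute_startup_scripts
  rw [show (PySem.Set.empty (α := String), ([] : List String)) = (([] : List String), ([] : List String)) from rfl]
  rw [pvLoop_inv]
  simp [PySem.List.dedup_eq_ofList, ← PySem.Set.update_nil_left, PySem.Set.update]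

-- B's fold, written as structural recursion on the list (the backward loop applies the head's write last)
def pvFoldr (xs : List String) (n : Int) : PySem.Dict String Int :=
  match xs with
  | [] => PySem.Dict.empty
  | x :: t => let d := pvFoldr t (n + 1); if pvPredB x then d.insert x n else d

lemma pvFold_eq_pvFoldr (xs : List String) (n : Int) :
    (PySem.List.enumerate xs n).reverse.foldl
      (fun (d : PySem.Dict String Int) p => if pvPredB p.2 then d.insert p.2 p.1 else d)
      PySem.Dict.empty
    = pvFoldr xs n := by
  induction xs generalizing n with
  | nil => simp [PySem.List.enumerate_nil, pvFoldr]
  | cons x t ih =>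
    rw [PySem.List.enumerate_cons]
    simp only [List.reverse_cons, List.foldl_append, List.foldl_cons, List.foldl_nil]
    rw [ih (n + 1)]
    rfl

-- first-occurrence index of a matching script, at offset n
def pvFIdx (xs : List String) (n : Int) (s : String) : Option Int :=
  match xs with
  | [] => none
  | x :: t => if pvPredB x ∧ s = x then some n else pvFIdx t (n + 1) s

lemma pvGet?_pvFoldr (xs : List String) (n : Int) (s : String) :
    (pvFoldr xs n).get? s = pvFIdx xs n s := by
  induction xs generalizing n with
  | nil => simp [pvFoldr, pvFIdx, PySem.Dict.get?_empty]
  | cons x t ih =>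
    simp only [pvFoldr, pvFIdx]
    by_cases hp : pvPredB x = true
    · rw [if_pos hp]
      rw [PySem.Dict.get?_insert]
      by_cases hs : s = x
      · simp [hs, hp]
      · simp [hs, hp, ih]
    · simp only [hp, Bool.false_eq_true, false_and, if_false]
      exact ih (n + 1)

lemma pvFIdx_isSome (xs : List String) (n : Int) (s : String) :
    (pvFIdx xs n s).isSome = true ↔ (pvPredB s = true ∧ s ∈ xs) := by
  induction xs generalizing n with
  | nil => simp [pvFIdx]
  | cons x t ih =>
    simp only [pvFIdx]
    by_cases hx : pvPredB x = true ∧ s = x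
    · simp [hx]
    · rw [if_neg hx]
      rw [ih (n + 1)]
      constructor
      · rintro ⟨hp, hm⟩; exact ⟨hp, List.mem_cons_of_mem _ hm⟩
      · rintro ⟨hp, hm⟩
        rcases List.mem_cons.mp hm with h | h
        · exact absurd ⟨h ▸ hp, h⟩ hx
        · exact ⟨hp, h⟩

lemma pvFIdx_ge (xs : List String) (n : Int) (s : String) (v : Int)
    (h : pvFIdx xs n s = some v) : n ≤ v := by
  induction xs generalizing n with
  | nil => simp [pvFIdx] at h
  | cons x t ih =>
    simp only [pvFIdx] at h
    by_cases hx : pvPredB x = true ∧ s = x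
    · rw [if_pos hx] at h
      exact le_of_eq (Option.some.inj h)
    · rw [if_neg hx] at h
      have := ih (n + 1) h
      omega

lemma pvNodup_keys_pvFoldr (xs : List String) (n : Int) :
    (pvFoldr xs n).keys.Nodup := by
  induction xs generalizing n with
  | nil => exact PySem.Dict.nodup_keys_empty
  | cons x t ih =>
    simp only [pvFoldr]
    by_cases hp : pvPredB x = true
    · rw [if_pos hp]; exact PySem.Dict.nodup_keys_insert _ _ _ (ih (n + 1))
    · rw [if_neg hp]; exact ih (n + 1)

-- first-occurrence dedup, recursively: dedup (y :: ys) = y :: (dedup ys with y removed)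
lemma pvUpdate_filter (xs : List String) (s : List String) :
    PySem.Set.update s xs = s ++ (PySem.Set.ofList xs).filter (fun a => decide (a ∉ s)) := by
  induction xs generalizing s with
  | nil => simp [PySem.Set.update, PySem.Set.ofList]
  | cons y xs ih =>
    have hof : PySem.Set.ofList (y :: xs) = PySem.Set.update [y] xs := by
      simp [PySem.Set.ofList_eq_foldl, PySem.Set.update, PySem.Set.add, PySem.Set.contains]
    have hupd : PySem.Set.update s (y :: xs) = PySem.Set.update (PySem.Set.add s y) xs := by
      simp [PySem.Set.update]
    rw [hupd, ih, hof, ih]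
    by_cases hy : y ∈ s
    · have hadd : PySem.Set.add s y = s := by simp [PySem.Set.add, hy]
      rw [hadd]
      congr 1
      rw [List.singleton_append, List.filter_cons_of_neg (by simp [hy]), List.filter_filter]
      apply List.filter_congr
      intro a _
      by_cases ha : a ∈ s
      · simp [ha]
      · have : a ≠ y := fun h => ha (h ▸ hy)
        simp [ha, this]
    · have hadd : PySem.Set.add s y = s ++ [y] := by
        simp [PySem.Set.add, hy]
      rw [hadd]
      rw [List.singleton_append, List.filter_cons_of_pos (by simp [hy]), List.filter_filter, List.append_assoc]
      congr 1
      rw [show ([y] : List String) ++ List.filter (fun a => decide (a ∉ s ++ [y])) (PySem.Set.ofList xs) = y :: List.filter (fun a => decide (a ∉ s ++ [y])) (PySem.Set.ofList xs) from rfl]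
      congr 1
      apply List.filter_congr
      intro a _
      by_cases ha : a ∈ s
      · simp [ha]
      · by_cases hay : a = y
        · simp [hay]
        · simp [ha, hay]

lemma pvDedup_cons (y : String) (ys : List String) :
    PySem.List.dedup (y :: ys) = y :: (PySem.List.dedup ys).filter (fun a => a ≠ y) := by
  have h1 : PySem.List.dedup (y :: ys) = PySem.Set.update [] (y :: ys) := by
    simp [PySem.List.dedup_eq_ofList, PySem.Set.ofList_eq_foldl, PySem.Set.update]
  have h2 : PySem.List.dedup ys = PySem.Set.update [] ys := by
    simp [PySem.List.dedup_eq_ofList, PySem.Set.ofList_eq_foldl, PySem.Set.update]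
  rw [h1, h2]
  have hupd : PySem.Set.update ([] : List String) (y :: ys) = PySem.Set.update [y] ys := by
    simp [PySem.Set.update, PySem.Set.add, PySem.Set.contains]
  rw [hupd, pvUpdate_filter, pvUpdate_filter]
  simp only [List.nil_append, List.singleton_append, List.cons.injEq, true_and]
  rw [List.filter_filter]
  apply List.filter_congr
  intro a _
  by_cases h : a = y <;> simp [h]

-- along dedup(filter), the first-occurrence indices are strictly increasing
lemma pvPairwise_fIdx (xs : List String) (n : Int) :
    (PySem.List.dedup (xs.filter pvPredB)).Pairwise
      (fun a b => (pvFIdx xs n a).getD 0 < (pvFIdx xs n b).getD 0) := by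
  induction xs generalizing n with
  | nil => simp [PySem.List.dedup_eq_ofList, PySem.Set.ofList]
  | cons x t ih =>
    rw [List.filter_cons]
    by_cases hp : pvPredB x = true
    · rw [if_pos hp, pvDedup_cons]
      constructor
      · intro b hb
        have hbmem := List.mem_of_mem_filter hb
        have hbne : b ≠ x := by simpa using (List.of_mem_filter hb)
        have hbprop : pvPredB b = true ∧ b ∈ t := by
          have : b ∈ t.filter pvPredB := (PySem.List.mem_dedup _ _).mp hbmem
          exact ⟨List.of_mem_filter this, List.mem_of_mem_filter this⟩
        have hsome : (pvFIdx t (n + 1) b).isSome = true := (pvFIdx_isSome t (n + 1) b).mpr hbprop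
        obtain ⟨v, hv⟩ := Option.isSome_iff_exists.mp hsome
        have hge := pvFIdx_ge t (n + 1) b v hv
        have hxa : pvFIdx (x :: t) n x = some n := by simp [pvFIdx, hp]
        have hxb : pvFIdx (x :: t) n b = pvFIdx t (n + 1) b := by
          simp [pvFIdx, hbne]
        rw [hxa, hxb, hv]
        simp only [Option.getD_some]
        omega
      · have hsub : ((PySem.List.dedup (t.filter pvPredB)).filter (fun a => a ≠ x)).Sublist
            (PySem.List.dedup (t.filter pvPredB)) := List.filter_sublist
        have hpw := (ih (n + 1)).sublist hsub
        refine List.Pairwise.imp_of_mem ?_ hpw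
        intro a b ha hb h
        have hane : a ≠ x := by simpa using (List.of_mem_filter ha)
        have hbne : b ≠ x := by simpa using (List.of_mem_filter hb)
        have h1 : pvFIdx (x :: t) n a = pvFIdx t (n + 1) a := by simp [pvFIdx, hane]
        have h2 : pvFIdx (x :: t) n b = pvFIdx t (n + 1) b := by simp [pvFIdx, hbne]
        rw [h1, h2]
        exact h
    · rw [if_neg hp]
      refine List.Pairwise.imp_of_mem ?_ (ih (n + 1))
      intro a b ha hb h
      have hane : a ≠ x := by
        intro hax
        have : pvPredB a = true := List.of_mem_filter ((PySem.List.mem_dedup _ _).mp ha)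
        exact hp (hax ▸ this)
      have hbne : b ≠ x := by
        intro hbx
        have : pvPredB b = true := List.of_mem_filter ((PySem.List.mem_dedup _ _).mp hb)
        exact hp (hbx ▸ this)
      have h1 : pvFIdx (x :: t) n a = pvFIdx t (n + 1) a := by simp [pvFIdx, hane]
      have h2 : pvFIdx (x :: t) n b = pvFIdx t (n + 1) b := by simp [pvFIdx, hbne]
      rw [h1, h2]
      exact h

-- B's result equals ordered dedup of the filtered list
lemma pvB_eq_dedup_filter (xs : List String) :
    execute_startup_scripts_alt xs = PySem.List.dedup (xs.filter pvPredB) := by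
  unfold execute_startup_scripts_alt
  rw [pvFold_eq_pvFoldr]
  set d := pvFoldr xs 0 with hd
  set ys := PySem.List.dedup (xs.filter pvPredB) with hys
  have hkey : ∀ a, d.getD a 0 = (pvFIdx xs 0 a).getD 0 := by
    intro a
    rw [PySem.Dict.getD_eq_get?_getD, hd, pvGet?_pvFoldr]
  have hmemkeys : ∀ a, a ∈ d.keys ↔ (pvPredB a = true ∧ a ∈ xs) := by
    intro a
    rw [← pvFIdx_isSome xs 0 a]
    constructor
    · intro hk
      by_contra hnone
      have : (pvFIdx xs 0 a) = none := by
        cases h : pvFIdx xs 0 a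
        · rfl
        · exact absurd (by simp [h]) hnone
      have : d.get? a = none := by rw [hd, pvGet?_pvFoldr]; exact this
      exact ((PySem.Dict.get?_eq_none_iff_not_mem_keys _ _).mp this) hk
    · intro hs
      by_contra hk
      have : d.get? a = none := (PySem.Dict.get?_eq_none_iff_not_mem_keys _ _).mpr hk
      rw [hd, pvGet?_pvFoldr] at this
      rw [this] at hs
      simp at hs
  have hperm : ys.Perm d.keys := by
    rw [(List.perm_ext_iff_of_nodup (by rw [hys]; exact PySem.List.nodup_dedup _) (hd ▸ pvNodup_keys_pvFoldr xs 0))]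
    intro a
    rw [hmemkeys a, hys, PySem.List.mem_dedup, List.mem_filter]
    tauto
  have hpw : ys.Pairwise (fun a b => d.getD a 0 < d.getD b 0) := by
    have := pvPairwise_fIdx xs 0
    refine List.Pairwise.imp ?_ this
    intro a b h
    rw [hkey a, hkey b]
    exact h
  exact PySem.List.sorted_eq_of_perm_of_pairwise_lt d.keys ys (fun k => d.getD k 0) hperm hpw

-- ===== VERDICT (by name: the statement is the Claim_ definition above) =====
theorem execute_startup_scripts_spec : Claim_equal_execute_startup_scripts := by
  intro xs _
  unfold Spec_execute_startup_scripts
  rw [pvA_eq_dedup_filter, pvB_eq_dedup_filter]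
  rfl
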